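-- pv_equiv track=rewrite | github.com/emanuellegrody/SALVEseq | extractionScripts/Python/predict_polyA.py | deduplicate_regions
-- ===== SOURCE A (Python) =====
-- def deduplicate_regions(regions):
--     """
--     Remove duplicate regions, keeping longest version of overlapping matches.
--
--     Args:
--         regions: List of tuples (start_pos, end_pos, length, mismatches)
--
--     Returns:
--         Deduplicated list of regions
--
--     Technical note: When multiple A-rich regions start at same position
--     (e.g., AAAAAA contains AAAAAA, AAAAA, AAAA as valid regions),
--     we keep only the longest one to avoid redundancy in output.
--     """
--     if not regions:
--         return regions
--
--     # Group by start position
--     by_start = {}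
--     for region in regions:
--         start = region[0]
--         if start not in by_start:
--             by_start[start] = []
--         by_start[start].append(region)
--
--     # Keep longest region for each start position
--     unique_regions = []
--     for start, group in by_start.items():
--         # Sort by length (descending), then by mismatches (ascending)
--         # Prefer longer regions with fewer mismatches
--         best = max(group, key=lambda x: (x[2], -x[3]))
--         unique_regions.append(best)
--
--     # Sort by start position for output
--     unique_regions.sort(key=lambda x: x[0])
--
--     return unique_regions
-- ===== SOURCE B (Python) =====
-- def deduplicate_regions(regions):
--     """Single pass keeping the running best region per start, then sort by start."""
--     if not regions:
--         return regions
--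
--     best = {}
--     for r in regions:
--         cur = best.get(r[0])
--         if cur is None or (r[2], -r[3]) > (cur[2], -cur[3]):
--             best[r[0]] = r
--
--     return sorted(best.values(), key=lambda x: x[0])
-- ===== Notes on version B (the rewrite author's own statement) =====
-- stated objective: simpler
-- what changed: Instead of grouping all regions into per-start lists in a dict and then running a second max-reduction pass over every group, B keeps a single running best region per start in one pass (replacing only on a strictly better (length, -mismatches) key, which preserves max's first-wins tie-breaking), then sorts the dict values by start.
import Mathlib
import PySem

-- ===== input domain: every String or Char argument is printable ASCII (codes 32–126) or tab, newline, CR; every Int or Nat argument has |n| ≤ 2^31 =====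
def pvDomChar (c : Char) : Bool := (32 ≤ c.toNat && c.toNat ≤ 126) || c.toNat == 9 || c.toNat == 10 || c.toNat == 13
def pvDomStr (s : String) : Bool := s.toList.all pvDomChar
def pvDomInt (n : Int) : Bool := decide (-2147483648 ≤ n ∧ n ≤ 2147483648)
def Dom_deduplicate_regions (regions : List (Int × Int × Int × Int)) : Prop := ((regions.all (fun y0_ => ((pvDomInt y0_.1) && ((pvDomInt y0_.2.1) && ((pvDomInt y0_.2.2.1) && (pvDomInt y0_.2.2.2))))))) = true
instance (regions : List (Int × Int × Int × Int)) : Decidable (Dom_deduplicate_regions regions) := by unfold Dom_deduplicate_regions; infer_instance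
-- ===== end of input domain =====

-- B keeps one running best region per start in a single pass instead of A's
-- group-lists-then-max second pass; same values, same order, no speed claim.

-- ===== PORT A =====
-- the grouping loop: `if start not in by_start: by_start[start] = []; by_start[start].append(region)`
def pvStepA (d : PySem.Dict Int (List (Int × Int × Int × Int))) (region : Int × Int × Int × Int) :
    PySem.Dict Int (List (Int × Int × Int × Int)) :=
  let d' := if d.contains region.1 then d else d.insert region.1 []
  PySem.Dict.modify d' region.1 [] (fun g => g ++ [region])

def deduplicate_regions (regions : List (Int × Int × Int × Int)) : List (Int × Int × Int × Int) :=
  if regions = [] then regions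
  else
    let by_start := regions.foldl pvStepA PySem.Dict.empty
    -- `best = max(group, key=lambda x: (x[2], -x[3]))`; the .getD default is unreachable (groups are nonempty)
    let unique_regions := by_start.items.foldl
      (fun acc p => acc ++ [(PySem.List.max2? p.2 (fun x => x.2.2.1) (fun x => -x.2.2.2)).getD (0, 0, 0, 0)]) []
    PySem.List.sorted unique_regions (fun x => x.1)

-- ===== PORT B =====
-- `(r[2], -r[3]) > (cur[2], -cur[3])` — Python's lexicographic tuple comparison
def pvBetter (r cur : Int × Int × Int × Int) : Bool :=
  decide (r.2.2.1 > cur.2.2.1) || (r.2.2.1 == cur.2.2.1 && decide (-r.2.2.2 > -cur.2.2.2))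

def pvStepB (d : PySem.Dict Int (Int × Int × Int × Int)) (r : Int × Int × Int × Int) :
    PySem.Dict Int (Int × Int × Int × Int) :=
  match d.get? r.1 with
  | none => d.insert r.1 r
  | some cur => if pvBetter r cur then d.insert r.1 r else d

def deduplicate_regions_alt (regions : List (Int × Int × Int × Int)) : List (Int × Int × Int × Int) :=
  if regions = [] then regions
  else
    let best := regions.foldl pvStepB PySem.Dict.empty
    PySem.List.sorted best.values (fun x => x.1)

-- ===== PRECONDITION & SPEC =====
def Spec_deduplicate_regions (regions : List (Int × Int × Int × Int)) (out : List (Int × Int × Int × Int)) : Prop := out = deduplicate_regions_alt regions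
instance (regions : List (Int × Int × Int × Int)) (out : List (Int × Int × Int × Int)) : Decidable (Spec_deduplicate_regions regions out) := by unfold Spec_deduplicate_regions; infer_instance

-- ===== CLAIM (what is proved, stated in full; the proofs are below) =====
def Claim_equal_deduplicate_regions : Prop := ∀ (regions : List (Int × Int × Int × Int)), Dom_deduplicate_regions regions → Spec_deduplicate_regions regions (deduplicate_regions regions)

-- ===== LEMMAS AND PROOFS =====

-- abbreviation for the proofs: A's max key
def pvMaxA (g : List (Int × Int × Int × Int)) : Option (Int × Int × Int × Int) :=
  PySem.List.max2? g (fun x => x.2.2.1) (fun x => -x.2.2.2)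

lemma pvMaxA_append (g : List (Int × Int × Int × Int)) (r : Int × Int × Int × Int) :
    pvMaxA (g ++ [r]) =
      match pvMaxA g with
      | none => some r
      | some m => if pvBetter r m then some r else some m := by
  simp only [pvMaxA, PySem.List.max2?, List.foldl_append, List.foldl_cons, List.foldl_nil]
  cases h : List.foldl _ (none : Option (Int × Int × Int × Int)) g with
  | none => rfl
  | some m =>
    simp only [pvBetter]
    by_cases h1 : m.2.2.1 < r.2.2.1
    · simp [h1, gt_iff_lt]
    · by_cases h2 : r.2.2.1 < m.2.2.1
      · have h3 : ¬ (r.2.2.1 = m.2.2.1) := by omega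
        simp [h1, h2, h3, gt_iff_lt]
      · have he : r.2.2.1 = m.2.2.1 := by omega
        by_cases h3 : -m.2.2.2 < -r.2.2.2 <;> simp [h3, he, gt_iff_lt]

lemma pvMaxA_eq_none_iff (g : List (Int × Int × Int × Int)) : pvMaxA g = none ↔ g = [] := by
  induction g using List.reverseRecOn with
  | nil => simp [pvMaxA, PySem.List.max2?]
  | append_singleton g r _ =>
    rw [pvMaxA_append]
    cases h : pvMaxA g with
    | none => simp
    | some m => by_cases hb : pvBetter r m <;> simp [hb]

-- the invariant of B's fold: keys are the distinct starts in order, lookup is A's max of the group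
lemma pvFoldB_char (regions : List (Int × Int × Int × Int)) :
    (regions.foldl pvStepB PySem.Dict.empty).keys = PySem.Set.ofList (regions.map (·.1)) ∧
    ∀ c : Int, (regions.foldl pvStepB PySem.Dict.empty).get? c =
        pvMaxA (regions.filter (fun r => r.1 == c)) := by
  induction regions using List.reverseRecOn with
  | nil => exact ⟨rfl, fun c => rfl⟩
  | append_singleton regions r ih =>
    obtain ⟨hkeys, hget⟩ := ih
    rw [List.foldl_append, List.foldl_cons, List.foldl_nil]
    set d := regions.foldl pvStepB PySem.Dict.empty with hd
    have hfilter : ∀ c : Int, (regions ++ [r]).filter (fun x => x.1 == c) =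
        regions.filter (fun x => x.1 == c) ++ (if r.1 = c then [r] else []) := by
      intro c
      rw [List.filter_append]
      by_cases h : r.1 = c <;> simp [h]
    have hmapfst : (regions ++ [r]).map (·.1) = regions.map (·.1) ++ [r.1] := by simp
    cases hc : d.get? r.1 with
    | none =>
      have hnil : regions.filter (fun x => x.1 == r.1) = [] := by
        have h := hget r.1; rw [hc] at h
        exact (pvMaxA_eq_none_iff _).mp h.symm
      have hnotmem : r.1 ∉ regions.map (·.1) := by
        intro hmem
        obtain ⟨x, hx, hx1⟩ := List.mem_map.mp hmem
        have hx2 : x ∈ regions.filter (fun y => y.1 == r.1) := by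
          simp [List.mem_filter, hx, hx1]
        rw [hnil] at hx2; exact absurd hx2 (List.not_mem_nil)
      have hcontains : d.contains r.1 = false := by
        rw [PySem.Dict.contains_eq_isSome_get?, hc]; rfl
      have hstep : pvStepB d r = d.insert r.1 r := by
        rw [pvStepB, hc]
      rw [hstep]
      constructor
      · rw [PySem.Dict.keys_insert_of_not_contains d r hcontains, hkeys, hmapfst,
          PySem.Set.ofList_append, PySem.Set.update_cons, PySem.Set.update_nil,
          PySem.Set.add]
        have hcon : ¬ ((PySem.Set.ofList (regions.map (·.1))).contains r.1 = true) := by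
          intro hmem
          exact hnotmem ((PySem.Set.mem_ofList _ _).mp (List.mem_of_elem_eq_true hmem))
        rw [if_neg hcon]
      · intro c
        by_cases hceq : c = r.1
        · subst hceq
          rw [PySem.Dict.get?_insert_self, hfilter r.1, hnil]
          simp [pvMaxA, PySem.List.max2?]
        · rw [PySem.Dict.get?_insert_of_ne d r hceq, hget c, hfilter c]
          have hne : ¬ (r.1 = c) := fun h => hceq h.symm
          simp [hne]
    | some m =>
      have hcontains : d.contains r.1 = true := by
        rw [PySem.Dict.contains_eq_isSome_get?, hc]; rfl
      have hmem : r.1 ∈ regions.map (·.1) := by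
        have hm := hget r.1; rw [hc] at hm
        by_contra hnot
        have hnil : regions.filter (fun x => x.1 == r.1) = [] := by
          rw [List.filter_eq_nil_iff]
          intro x hx
          simp only [beq_iff_eq]
          intro hx1
          exact hnot (List.mem_map.mpr ⟨x, hx, hx1⟩)
        rw [hnil] at hm
        simp [pvMaxA, PySem.List.max2?] at hm
      have hsetkeys : PySem.Set.ofList ((regions ++ [r]).map (·.1)) = PySem.Set.ofList (regions.map (·.1)) := by
        rw [hmapfst, PySem.Set.ofList_append, PySem.Set.update_cons, PySem.Set.update_nil,
          PySem.Set.add]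
        have hcon : (PySem.Set.ofList (regions.map (·.1))).contains r.1 = true := by
          exact List.elem_eq_true_of_mem ((PySem.Set.mem_ofList _ _).mpr hmem)
        rw [if_pos hcon]
      have hstep : pvStepB d r = if pvBetter r m then d.insert r.1 r else d := by
        rw [pvStepB, hc]
      have hnewmax : pvMaxA ((regions ++ [r]).filter (fun x => x.1 == r.1)) =
          if pvBetter r m then some r else some m := by
        rw [hfilter r.1, if_pos rfl, pvMaxA_append]
        have h := hget r.1; rw [hc] at h
        rw [← h]
      rw [hstep]
      by_cases hb : pvBetter r m
      · rw [if_pos hb]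
        constructor
        · rw [PySem.Dict.keys_insert_of_contains d r hcontains, hkeys, hsetkeys]
        · intro c
          by_cases hceq : c = r.1
          · subst hceq
            rw [hnewmax, if_pos hb, PySem.Dict.get?_insert_self]
          · have hne : ¬ (r.1 = c) := fun h => hceq h.symm
            rw [PySem.Dict.get?_insert_of_ne d r hceq, hget c, hfilter c]
            simp [hne]
      · rw [if_neg hb]
        constructor
        · rw [hkeys, hsetkeys]
        · intro c
          by_cases hceq : c = r.1
          · subst hceq
            rw [hnewmax, if_neg hb, hc]
          · have hne : ¬ (r.1 = c) := fun h => hceq h.symm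
            rw [hget c, hfilter c]
            simp [hne]

-- A's grouping step is a single dict.modify
lemma pvStepA_eq_modify (d : PySem.Dict Int (List (Int × Int × Int × Int))) (r : Int × Int × Int × Int) :
    pvStepA d r = PySem.Dict.modify d r.1 [] (fun g => g ++ [r]) := by
  rw [pvStepA]
  by_cases h : d.contains r.1 = true
  · simp [h]
  · have h' : d.contains r.1 = false := by simpa using h
    simp only [h', Bool.false_eq_true, if_false]
    show PySem.Dict.modify (d.insert r.1 []) r.1 [] (fun g => g ++ [r]) = _
    rw [PySem.Dict.modify, PySem.Dict.modify, PySem.Dict.getD_insert_self,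
      PySem.Dict.insert_insert_self, PySem.Dict.getD_of_not_contains d [] h']

-- A's grouping dict: keys are the distinct starts in order, lookup is the group
lemma pvFoldA_char (regions : List (Int × Int × Int × Int)) :
    (regions.foldl pvStepA PySem.Dict.empty).keys = PySem.Set.ofList (regions.map (·.1)) ∧
    ∀ c : Int, (regions.foldl pvStepA PySem.Dict.empty).getD c [] =
        regions.filter (fun r => r.1 == c) := by
  have hstep : regions.foldl pvStepA PySem.Dict.empty =
      regions.foldl (fun d r => PySem.Dict.modify d r.1 [] (fun g => g ++ [r])) PySem.Dict.empty := by
    apply PySem.List.foldl_congr_mem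
    intro d r _
    exact pvStepA_eq_modify d r
  rw [hstep]
  constructor
  · rw [PySem.Dict.keys_foldl_modify_key regions (·.1) [] (fun _ r g => g ++ [r])]
    rw [PySem.Dict.keys_empty, PySem.Set.update_nil_left]
  · intro c
    have hmap : regions.foldl (fun d r => PySem.Dict.modify d r.1 [] (fun g => g ++ [r])) PySem.Dict.empty =
        (regions.map (fun r => (r.1, r))).foldl (fun d p => PySem.Dict.modify d p.1 [] (fun g => g ++ [p.2])) PySem.Dict.empty := by
      rw [List.foldl_map]
    rw [hmap, PySem.Dict.getD_foldl_modify_append, PySem.Dict.getD_empty, List.nil_append,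
      List.filter_map]
    simp [Function.comp_def]

-- ===== VERDICT (by name: the statement is the Claim_ definition above) =====
theorem deduplicate_regions_spec : Claim_equal_deduplicate_regions := by
  unfold Claim_equal_deduplicate_regions Spec_deduplicate_regions
  intro regions _
  by_cases hnil : regions = []
  · subst hnil; rfl
  · obtain ⟨hBkeys, hBget⟩ := pvFoldB_char regions
    obtain ⟨hAkeys, hAgetD⟩ := pvFoldA_char regions
    have hAnodup : (regions.foldl pvStepA PySem.Dict.empty).keys.Nodup := by
      rw [hAkeys]; exact PySem.Set.nodup_ofList _
    have hBnodup : (regions.foldl pvStepB PySem.Dict.empty).keys.Nodup := by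
      rw [hBkeys]; exact PySem.Set.nodup_ofList _
    simp only [deduplicate_regions, deduplicate_regions_alt, if_neg hnil]
    rw [PySem.List.foldl_append_singleton_eq_map
          (fun (p : Int × List (Int × Int × Int × Int)) =>
            (PySem.List.max2? p.2 (fun x => x.2.2.1) (fun x => -x.2.2.2)).getD (0, 0, 0, 0)),
        PySem.Dict.items_eq_map_keys _ hAnodup [],
        PySem.Dict.values_eq_map_keys _ hBnodup (0, 0, 0, 0),
        List.map_map, List.nil_append, hAkeys, hBkeys]
    congr 1
    apply List.map_congr_left
    intro k _
    show (pvMaxA ((regions.foldl pvStepA PySem.Dict.empty).getD k [])).getD (0, 0, 0, 0) =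
      (regions.foldl pvStepB PySem.Dict.empty).getD k (0, 0, 0, 0)
    rw [hAgetD k, PySem.Dict.getD_eq_get?_getD, hBget k]
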